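-- pv_equiv track=rewrite | github.com/ExRecon/exrecon | .github/scripts/ai_maintainer.py | detect_issue_style
-- ===== SOURCE A (Python) =====
-- def detect_issue_style(labels: list[str], title: str, body: str) -> tuple[str, str]:
--     combined = f"{title}\n{body}".lower()
--     if any(label in labels for label in ("bug", "defect", "regression")):
--         return (
--             "bug",
--             "Treat this as a likely defect report. Focus on observed behavior, suspected scope, and debugging next steps.",
--         )
--     if any(label in labels for label in ("feature", "enhancement")):
--         return (
--             "feature",
--             "Treat this as a feature request. Focus on user value, implementation surface area, and open product or design questions.",
--         )
--     if any(label in labels for label in ("documentation", "docs")):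
--         return (
--             "docs",
--             "Treat this as documentation work. Focus on missing clarity, affected docs surface, and the smallest useful documentation change.",
--         )
--     if any(label in labels for label in ("question", "support")):
--         return (
--             "question",
--             "Treat this as a question or support request. Focus on what information is missing and the shortest path to unblock the reporter.",
--         )
--     if any(label in labels for label in ("maintenance", "chore")):
--         return (
--             "maintenance",
--             "Treat this as maintenance work. Focus on operational cleanup, repo hygiene, or tooling implications.",
--         )
--     if "feature" in combined or "request" in combined:
--         return (
--             "feature",
--             "Infer that this is a feature request. Focus on user value, likely implementation scope, and unresolved decisions.",
--         )
--     if "bug" in combined or "error" in combined or "broken" in combined: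
--         return (
--             "bug",
--             "Infer that this is a bug report. Focus on symptoms, likely impact, and debugging next steps.",
--         )
--     return (
--         "general",
--         "Treat this as a general repository issue. Focus on the clearest maintainer action and any missing details.",
--     )
-- ===== SOURCE B (Python) =====
-- _LABEL_PRIORITY = {
--     "bug": 0, "defect": 0, "regression": 0,
--     "feature": 1, "enhancement": 1,
--     "documentation": 2, "docs": 2,
--     "question": 3, "support": 3,
--     "maintenance": 4, "chore": 4,
-- }
--
-- _LABEL_CATEGORIES = [
--     ("bug",
--      "Treat this as a likely defect report. Focus on observed behavior, suspected scope, and debugging next steps."),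
--     ("feature",
--      "Treat this as a feature request. Focus on user value, implementation surface area, and open product or design questions."),
--     ("docs",
--      "Treat this as documentation work. Focus on missing clarity, affected docs surface, and the smallest useful documentation change."),
--     ("question",
--      "Treat this as a question or support request. Focus on what information is missing and the shortest path to unblock the reporter."),
--     ("maintenance",
--      "Treat this as maintenance work. Focus on operational cleanup, repo hygiene, or tooling implications."),
-- ]
--
-- _KEYWORD_PRIORITY = [
--     ("feature", 0), ("request", 0),
--     ("bug", 1), ("error", 1), ("broken", 1),
-- ]
--
-- _TEXT_CATEGORIES = [
--     ("feature",
--      "Infer that this is a feature request. Focus on user value, likely implementation scope, and unresolved decisions."),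
--     ("bug",
--      "Infer that this is a bug report. Focus on symptoms, likely impact, and debugging next steps."),
-- ]
--
-- _GENERAL = (
--     "general",
--     "Treat this as a general repository issue. Focus on the clearest maintainer action and any missing details.",
-- )
--
--
-- def detect_issue_style(labels: list[str], title: str, body: str) -> tuple[str, str]:
--     # Single pass over the labels keeping the lowest category priority seen
--     # (5 = no category); rule order is encoded as numeric priority.
--     best = 5
--     for label in labels:
--         best = min(best, _LABEL_PRIORITY.get(label, 5))
--     if best < 5:
--         return _LABEL_CATEGORIES[best]
--     # Text fallback: lowest priority among keywords occurring in the text (2 = none).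
--     combined = f"{title}\n{body}".lower()
--     tbest = 2
--     for keyword, pri in _KEYWORD_PRIORITY:
--         if keyword in combined:
--             tbest = min(tbest, pri)
--     if tbest < 2:
--         return _TEXT_CATEGORIES[tbest]
--     return _GENERAL
-- ===== Notes on version B (the rewrite author's own statement) =====
-- stated objective: alternative
-- what changed: Replaced the ordered chain of rule checks (each scanning the labels / the text anew) by a single min-priority pass: every label is looked up once in a priority dict and the lowest priority found indexes a category table, and the text fallback likewise takes the minimum priority among keywords present.
import Mathlib
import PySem

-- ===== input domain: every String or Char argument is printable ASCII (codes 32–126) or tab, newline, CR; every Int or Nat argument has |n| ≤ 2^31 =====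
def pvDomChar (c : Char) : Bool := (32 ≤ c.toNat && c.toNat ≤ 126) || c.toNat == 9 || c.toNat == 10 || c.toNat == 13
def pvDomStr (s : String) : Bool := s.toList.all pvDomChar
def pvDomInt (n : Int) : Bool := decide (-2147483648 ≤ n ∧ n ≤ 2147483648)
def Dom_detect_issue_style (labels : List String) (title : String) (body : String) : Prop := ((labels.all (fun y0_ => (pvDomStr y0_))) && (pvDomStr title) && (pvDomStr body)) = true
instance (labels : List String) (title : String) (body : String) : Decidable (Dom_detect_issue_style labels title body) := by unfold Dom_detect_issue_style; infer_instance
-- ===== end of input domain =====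

-- B replaces A's ordered chain of rule checks by a single min-priority pass over the
-- labels through a priority dict (and a min over the keywords present for the text
-- fallback), indexing category tables with the lowest priority found: alternative.

-- ===== PORT A =====
def detect_issue_style (labels : List String) (title : String) (body : String) : String × String :=
  let combined := PySem.Str.lower (title ++ "\n" ++ body)
  if (["bug", "defect", "regression"] : List String).any (fun label => labels.contains label) then
    ("bug", "Treat this as a likely defect report. Focus on observed behavior, suspected scope, and debugging next steps.")
  else if (["feature", "enhancement"] : List String).any (fun label => labels.contains label) then
    ("feature", "Treat this as a feature request. Focus on user value, implementation surface area, and open product or design questions.")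
  else if (["documentation", "docs"] : List String).any (fun label => labels.contains label) then
    ("docs", "Treat this as documentation work. Focus on missing clarity, affected docs surface, and the smallest useful documentation change.")
  else if (["question", "support"] : List String).any (fun label => labels.contains label) then
    ("question", "Treat this as a question or support request. Focus on what information is missing and the shortest path to unblock the reporter.")
  else if (["maintenance", "chore"] : List String).any (fun label => labels.contains label) then
    ("maintenance", "Treat this as maintenance work. Focus on operational cleanup, repo hygiene, or tooling implications.")
  else if PySem.Str.isIn "feature" combined || PySem.Str.isIn "request" combined then
    ("feature", "Infer that this is a feature request. Focus on user value, likely implementation scope, and unresolved decisions.")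
  else if (PySem.Str.isIn "bug" combined || PySem.Str.isIn "error" combined) || PySem.Str.isIn "broken" combined then
    ("bug", "Infer that this is a bug report. Focus on symptoms, likely impact, and debugging next steps.")
  else
    ("general", "Treat this as a general repository issue. Focus on the clearest maintainer action and any missing details.")

-- ===== PORT B =====
-- _LABEL_PRIORITY: a dict literal with distinct keys (Dict.mk of the key/value pairs)
def pvLabelPriority : PySem.Dict String Nat := PySem.Dict.mk
  [("bug", 0), ("defect", 0), ("regression", 0),
   ("feature", 1), ("enhancement", 1),
   ("documentation", 2), ("docs", 2),
   ("question", 3), ("support", 3),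
   ("maintenance", 4), ("chore", 4)]

-- _LABEL_CATEGORIES[best]: list indexing, exact for best < 5 (the only calls, guarded by best < 5)
def pvLabelCat : Nat → String × String
  | 0 => ("bug", "Treat this as a likely defect report. Focus on observed behavior, suspected scope, and debugging next steps.")
  | 1 => ("feature", "Treat this as a feature request. Focus on user value, implementation surface area, and open product or design questions.")
  | 2 => ("docs", "Treat this as documentation work. Focus on missing clarity, affected docs surface, and the smallest useful documentation change.")
  | 3 => ("question", "Treat this as a question or support request. Focus on what information is missing and the shortest path to unblock the reporter.")
  | _ => ("maintenance", "Treat this as maintenance work. Focus on operational cleanup, repo hygiene, or tooling implications.")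

def pvKeywordPriority : List (String × Nat) :=
  [("feature", 0), ("request", 0), ("bug", 1), ("error", 1), ("broken", 1)]

-- _TEXT_CATEGORIES[tbest]: list indexing, exact for tbest < 2 (the only calls, guarded by tbest < 2)
def pvTextCat : Nat → String × String
  | 0 => ("feature", "Infer that this is a feature request. Focus on user value, likely implementation scope, and unresolved decisions.")
  | _ => ("bug", "Infer that this is a bug report. Focus on symptoms, likely impact, and debugging next steps.")

def pvGeneral : String × String :=
  ("general", "Treat this as a general repository issue. Focus on the clearest maintainer action and any missing details.")

def detect_issue_style_alt (labels : List String) (title : String) (body : String) : String × String :=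
  let best := labels.foldl (fun b l => min b (PySem.Dict.getD pvLabelPriority l 5)) 5
  if best < 5 then pvLabelCat best
  else
    let combined := PySem.Str.lower (title ++ "\n" ++ body)
    let tbest := pvKeywordPriority.foldl
      (fun b kp => if PySem.Str.isIn kp.1 combined then min b kp.2 else b) 2
    if tbest < 2 then pvTextCat tbest else pvGeneral

-- ===== PRECONDITION & SPEC =====
def Spec_detect_issue_style (labels : List String) (title : String) (body : String) (out : String × String) : Prop := out = detect_issue_style_alt labels title body
instance (labels : List String) (title : String) (body : String) (out : String × String) : Decidable (Spec_detect_issue_style labels title body out) := by unfold Spec_detect_issue_style; infer_instance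

-- ===== CLAIM (what is proved, stated in full; the proofs are below) =====
def Claim_equal_detect_issue_style : Prop := ∀ (labels : List String) (title : String) (body : String), Dom_detect_issue_style labels title body → Spec_detect_issue_style labels title body (detect_issue_style labels title body)

-- ===== LEMMAS AND PROOFS =====

-- 'any(label in labels for label in grp)' read the other way round
theorem pvAnyContainsComm (xs ys : List String) :
    xs.any (fun a => ys.contains a) = ys.any (fun a => xs.contains a) := by
  rcases hx : xs.any (fun a => ys.contains a) with _ | _ <;>
    rcases hy : ys.any (fun a => xs.contains a) with _ | _ <;> try rfl
  · simp only [List.any_eq_false, List.any_eq_true] at hx hy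
    obtain ⟨a, ha, hm⟩ := hy
    exact absurd (by simpa using ha) (by simpa using hx a (by simpa using hm))
  · simp only [List.any_eq_false, List.any_eq_true] at hx hy
    obtain ⟨a, ha, hm⟩ := hx
    exact absurd (by simpa using ha) (by simpa using hy a (by simpa using hm))

-- the value A's ordered rule chain encodes, as a min of per-group indicators
def pvChain (labels : List String) : Nat :=
  min (if labels.any (fun a => (["bug", "defect", "regression"] : List String).contains a) then 0 else 5)
   (min (if labels.any (fun a => (["feature", "enhancement"] : List String).contains a) then 1 else 5)
    (min (if labels.any (fun a => (["documentation", "docs"] : List String).contains a) then 2 else 5)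
     (min (if labels.any (fun a => (["question", "support"] : List String).contains a) then 3 else 5)
      (if labels.any (fun a => (["maintenance", "chore"] : List String).contains a) then 4 else 5))))

theorem pvChain_le (labels : List String) : pvChain labels ≤ 5 := by
  rcases Bool.eq_false_or_eq_true (labels.any (fun a => (["bug", "defect", "regression"] : List String).contains a)) with b0 | b0 <;>
  rcases Bool.eq_false_or_eq_true (labels.any (fun a => (["feature", "enhancement"] : List String).contains a)) with b1 | b1 <;>
  rcases Bool.eq_false_or_eq_true (labels.any (fun a => (["documentation", "docs"] : List String).contains a)) with b2 | b2 <;>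
  rcases Bool.eq_false_or_eq_true (labels.any (fun a => (["question", "support"] : List String).contains a)) with b3 | b3 <;>
  rcases Bool.eq_false_or_eq_true (labels.any (fun a => (["maintenance", "chore"] : List String).contains a)) with b4 | b4 <;>
    simp only [pvChain, b0, b1, b2, b3, b4] <;> decide

-- one dict lookup = the min of the five group indicator values
theorem pvPriD_eq (l : String) :
    PySem.Dict.getD pvLabelPriority l 5 =
      min (if (["bug", "defect", "regression"] : List String).contains l then 0 else 5)
       (min (if (["feature", "enhancement"] : List String).contains l then 1 else 5)
        (min (if (["documentation", "docs"] : List String).contains l then 2 else 5)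
         (min (if (["question", "support"] : List String).contains l then 3 else 5)
          (if (["maintenance", "chore"] : List String).contains l then 4 else 5)))) := by
  by_cases h1 : l = "bug"
  · subst h1; decide
  by_cases h2 : l = "defect"
  · subst h2; decide
  by_cases h3 : l = "regression"
  · subst h3; decide
  by_cases h4 : l = "feature"
  · subst h4; decide
  by_cases h5 : l = "enhancement"
  · subst h5; decide
  by_cases h6 : l = "documentation"
  · subst h6; decide
  by_cases h7 : l = "docs"
  · subst h7; decide
  by_cases h8 : l = "question"
  · subst h8; decide
  by_cases h9 : l = "support"
  · subst h9; decide
  by_cases h10 : l = "maintenance"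
  · subst h10; decide
  by_cases h11 : l = "chore"
  · subst h11; decide
  simp [pvLabelPriority, PySem.Dict.getD_eq_get?_getD, PySem.Dict.get?, h1, h2, h3, h4, h5,
    h6, h7, h8, h9, h10, h11, Ne.symm h1, Ne.symm h2, Ne.symm h3, Ne.symm h4, Ne.symm h5,
    Ne.symm h6, Ne.symm h7, Ne.symm h8, Ne.symm h9, Ne.symm h10, Ne.symm h11]

set_option maxHeartbeats 4000000 in
theorem pvChain_cons (l : String) (ls : List String) :
    pvChain (l :: ls) = min (PySem.Dict.getD pvLabelPriority l 5) (pvChain ls) := by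
  rw [pvPriD_eq]
  simp only [pvChain, List.any_cons]
  rcases Bool.eq_false_or_eq_true ((["bug", "defect", "regression"] : List String).contains l) with c0 | c0 <;>
  rcases Bool.eq_false_or_eq_true ((["feature", "enhancement"] : List String).contains l) with c1 | c1 <;>
  rcases Bool.eq_false_or_eq_true ((["documentation", "docs"] : List String).contains l) with c2 | c2 <;>
  rcases Bool.eq_false_or_eq_true ((["question", "support"] : List String).contains l) with c3 | c3 <;>
  rcases Bool.eq_false_or_eq_true ((["maintenance", "chore"] : List String).contains l) with c4 | c4 <;>
  rcases Bool.eq_false_or_eq_true (ls.any (fun a => (["bug", "defect", "regression"] : List String).contains a)) with b0 | b0 <;>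
  rcases Bool.eq_false_or_eq_true (ls.any (fun a => (["feature", "enhancement"] : List String).contains a)) with b1 | b1 <;>
  rcases Bool.eq_false_or_eq_true (ls.any (fun a => (["documentation", "docs"] : List String).contains a)) with b2 | b2 <;>
  rcases Bool.eq_false_or_eq_true (ls.any (fun a => (["question", "support"] : List String).contains a)) with b3 | b3 <;>
  rcases Bool.eq_false_or_eq_true (ls.any (fun a => (["maintenance", "chore"] : List String).contains a)) with b4 | b4 <;>
    simp only [c0, c1, c2, c3, c4, b0, b1, b2, b3, b4] <;> decide

theorem pvFold_eq_chain (ls : List String) : ∀ b : Nat, b ≤ 5 →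
    ls.foldl (fun b l => min b (PySem.Dict.getD pvLabelPriority l 5)) b = min b (pvChain ls) := by
  induction ls with
  | nil =>
    intro b hb
    have h5 : pvChain [] = 5 := by decide
    simp only [List.foldl_nil, h5]
    omega
  | cons l ls ih =>
    intro b hb
    simp only [List.foldl_cons]
    rw [ih (min b (PySem.Dict.getD pvLabelPriority l 5)) (by omega), pvChain_cons]
    omega

-- ===== VERDICT (by name: the statement is the Claim_ definition above) =====
set_option maxHeartbeats 4000000 in
theorem detect_issue_style_spec : Claim_equal_detect_issue_style := by
  intro labels title body _
  unfold Spec_detect_issue_style detect_issue_style detect_issue_style_alt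
  simp only [pvFold_eq_chain labels 5 (le_refl 5), Nat.min_eq_right (pvChain_le labels),
    pvAnyContainsComm ["bug", "defect", "regression"] labels,
    pvAnyContainsComm ["feature", "enhancement"] labels,
    pvAnyContainsComm ["documentation", "docs"] labels,
    pvAnyContainsComm ["question", "support"] labels,
    pvAnyContainsComm ["maintenance", "chore"] labels]
  rcases Bool.eq_false_or_eq_true (labels.any (fun a => (["bug", "defect", "regression"] : List String).contains a)) with h0 | h0 <;>
  rcases Bool.eq_false_or_eq_true (labels.any (fun a => (["feature", "enhancement"] : List String).contains a)) with h1 | h1 <;>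
  rcases Bool.eq_false_or_eq_true (labels.any (fun a => (["documentation", "docs"] : List String).contains a)) with h2 | h2 <;>
  rcases Bool.eq_false_or_eq_true (labels.any (fun a => (["question", "support"] : List String).contains a)) with h3 | h3 <;>
  rcases Bool.eq_false_or_eq_true (labels.any (fun a => (["maintenance", "chore"] : List String).contains a)) with h4 | h4 <;>
  rcases Bool.eq_false_or_eq_true (PySem.Str.isIn "feature" (PySem.Str.lower (title ++ "\n" ++ body))) with t0 | t0 <;>
  rcases Bool.eq_false_or_eq_true (PySem.Str.isIn "request" (PySem.Str.lower (title ++ "\n" ++ body))) with t1 | t1 <;>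
  rcases Bool.eq_false_or_eq_true (PySem.Str.isIn "bug" (PySem.Str.lower (title ++ "\n" ++ body))) with t2 | t2 <;>
  rcases Bool.eq_false_or_eq_true (PySem.Str.isIn "error" (PySem.Str.lower (title ++ "\n" ++ body))) with t3 | t3 <;>
  rcases Bool.eq_false_or_eq_true (PySem.Str.isIn "broken" (PySem.Str.lower (title ++ "\n" ++ body))) with t4 | t4 <;>
    simp only [pvChain, pvKeywordPriority, List.foldl_cons, List.foldl_nil,
      h0, h1, h2, h3, h4, t0, t1, t2, t3, t4] <;> decide
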